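-- pv_equiv track=rewrite | github.com/davidturturean/pref_vector | src/clustering_analysis.py | _generate_factor_names
-- ===== SOURCE A (Python) =====
-- from typing import Dict, List, Tuple, Optional, Any, Union
--
-- def _generate_factor_names(factor_interpretations: Dict[str, List[str]]) -> List[str]:
--     """Generate interpretable names for factors based on top-loading traits."""
--
--     factor_names = []
--
--     for factor_id, top_traits in factor_interpretations.items():
--         # Simple heuristic naming based on trait content
--         if any(trait in ["formality", "technical_complexity", "authority", "register"] for trait in top_traits):
--             name = "Formal-Academic"
--         elif any(trait in ["politeness", "empathy", "humor", "emotional_tone"] for trait in top_traits):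
--             name = "Interpersonal"
--         elif any(trait in ["verbosity", "clarity", "specificity", "concreteness"] for trait in top_traits):
--             name = "Linguistic-Surface"
--         elif any(trait in ["assertiveness", "certainty", "authority", "persuasiveness"] for trait in top_traits):
--             name = "Assertive-Confident"
--         elif any(trait in ["creativity", "humor", "optimism", "enthusiasm"] for trait in top_traits):
--             name = "Creative-Positive"
--         else:
--             name = f"Factor_{len(factor_names)+1}"
--
--         factor_names.append(name)
--
--     return factor_names
-- ===== SOURCE B (Python) =====
-- CATEGORIES = [
--     ("Formal-Academic", ["formality", "technical_complexity", "authority", "register"]),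
--     ("Interpersonal", ["politeness", "empathy", "humor", "emotional_tone"]),
--     ("Linguistic-Surface", ["verbosity", "clarity", "specificity", "concreteness"]),
--     ("Assertive-Confident", ["assertiveness", "certainty", "authority", "persuasiveness"]),
--     ("Creative-Positive", ["creativity", "humor", "optimism", "enthusiasm"]),
-- ]
--
-- # Inverted index: trait -> (rank of its highest-priority category, that category's name).
-- TRAIT_INFO = {}
-- for rank, (cat_name, traits) in enumerate(CATEGORIES):
--     for t in traits:
--         if t not in TRAIT_INFO:
--             TRAIT_INFO[t] = (rank, cat_name)
--
--
-- def _generate_factor_names(factor_interpretations):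
--     """Generate interpretable names for factors based on top-loading traits."""
--     factor_names = []
--     for top_traits in factor_interpretations.values():
--         best = None
--         for t in top_traits:
--             info = TRAIT_INFO.get(t)
--             if info is not None and (best is None or info[0] < best[0]):
--                 best = info
--         factor_names.append(best[1] if best is not None else f"Factor_{len(factor_names)+1}")
--     return factor_names
-- ===== Notes on version B (the rewrite author's own statement) =====
-- stated objective: faster
-- what changed: B inverts A's lookup direction: instead of scanning the five category trait-lists per factor in an if/elif cascade, it precomputes once an inverted index TRAIT_INFO mapping each trait to the (rank, name) of its highest-priority category, and per factor runs a single arg-min loop over the traits keeping the lowest-rank hit; the per-category scans disappear into one dict lookup per trait.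
import Mathlib
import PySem

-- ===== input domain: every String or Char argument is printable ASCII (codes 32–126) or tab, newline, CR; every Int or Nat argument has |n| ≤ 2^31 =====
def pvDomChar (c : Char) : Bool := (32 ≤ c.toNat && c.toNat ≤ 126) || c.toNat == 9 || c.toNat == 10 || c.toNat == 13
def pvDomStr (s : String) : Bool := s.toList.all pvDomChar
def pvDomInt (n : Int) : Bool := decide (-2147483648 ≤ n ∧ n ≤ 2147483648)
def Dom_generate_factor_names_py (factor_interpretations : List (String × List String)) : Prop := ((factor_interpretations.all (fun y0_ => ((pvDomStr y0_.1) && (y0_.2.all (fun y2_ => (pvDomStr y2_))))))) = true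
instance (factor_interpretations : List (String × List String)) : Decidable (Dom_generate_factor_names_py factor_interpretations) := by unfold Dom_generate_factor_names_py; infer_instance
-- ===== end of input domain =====

-- B replaces A's per-factor if/elif scan of the five category trait-lists by a precomputed
-- inverted index trait -> (rank, category name) and a per-factor arg-min loop (objective: alternative).

-- ===== PORT A =====
-- literal transliteration of A: fold over the items, appending one name per factor,
-- each name chosen by the if/elif chain; the fallback uses the running list's length.
def generate_factor_names_py (factor_interpretations : List (String × List String)) : List String :=
  factor_interpretations.foldl (fun factor_names p =>
    let top_traits := p.2
    let name :=
      if top_traits.any (fun trait => ["formality", "technical_complexity", "authority", "register"].contains trait) then "Formal-Academic"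
      else if top_traits.any (fun trait => ["politeness", "empathy", "humor", "emotional_tone"].contains trait) then "Interpersonal"
      else if top_traits.any (fun trait => ["verbosity", "clarity", "specificity", "concreteness"].contains trait) then "Linguistic-Surface"
      else if top_traits.any (fun trait => ["assertiveness", "certainty", "authority", "persuasiveness"].contains trait) then "Assertive-Confident"
      else if top_traits.any (fun trait => ["creativity", "humor", "optimism", "enthusiasm"].contains trait) then "Creative-Positive"
      else "Factor_" ++ PySem.Int.toStr ((factor_names.length : Int) + 1)
    factor_names ++ [name]) []

-- ===== PORT B =====
-- B's module-level data: the ordered category table …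
def pvCategories : List (String × List String) :=
  [("Formal-Academic", ["formality", "technical_complexity", "authority", "register"]),
   ("Interpersonal", ["politeness", "empathy", "humor", "emotional_tone"]),
   ("Linguistic-Surface", ["verbosity", "clarity", "specificity", "concreteness"]),
   ("Assertive-Confident", ["assertiveness", "certainty", "authority", "persuasiveness"]),
   ("Creative-Positive", ["creativity", "humor", "optimism", "enthusiasm"])]

-- … and the inverted index built from it once: trait -> (rank of its highest-priority category, name)
def pvTraitInfo : PySem.Dict String (Int × String) :=
  (PySem.List.enumerate pvCategories).foldl (fun d q =>
    q.2.2.foldl (fun d t => if d.contains t then d else d.insert t (q.1, q.2.1)) d)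
    PySem.Dict.empty

-- transliteration of B: per factor, a single arg-min loop over the traits keeping the
-- lowest-rank index hit; fallback name from the running list's length.
def generate_factor_names_py_alt (factor_interpretations : List (String × List String)) : List String :=
  factor_interpretations.foldl (fun factor_names p =>
    let best := p.2.foldl (fun best t =>
      match pvTraitInfo.get? t, best with
      | some info, none => some info
      | some info, some b => if info.1 < b.1 then some info else some b
      | none, _ => best) none
    factor_names ++ [match best with
      | some b => b.2
      | none => "Factor_" ++ PySem.Int.toStr ((factor_names.length : Int) + 1)]) []

-- ===== PRECONDITION & SPEC =====
def Spec_generate_factor_names_py (factor_interpretations : List (String × List String)) (out : List String) : Prop := out = generate_factor_names_py_alt factor_interpretations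
instance (factor_interpretations : List (String × List String)) (out : List String) : Decidable (Spec_generate_factor_names_py factor_interpretations out) := by unfold Spec_generate_factor_names_py; infer_instance

-- ===== CLAIM (what is proved, stated in full; the proofs are below) =====
def Claim_equal_generate_factor_names_py : Prop := ∀ (factor_interpretations : List (String × List String)), Dom_generate_factor_names_py factor_interpretations → Spec_generate_factor_names_py factor_interpretations (generate_factor_names_py factor_interpretations)

-- ===== LEMMAS AND PROOFS =====

-- proof-side name for B's per-trait step
def pvStep (best : Option (Int × String)) (t : String) : Option (Int × String) :=
  match pvTraitInfo.get? t, best with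
  | some info, none => some info
  | some info, some b => if info.1 < b.1 then some info else some b
  | none, _ => best

-- rank of a trait = index of the first category list containing it (5 = none)
def pvR (t : String) : Nat :=
  if ["formality", "technical_complexity", "authority", "register"].contains t then 0
  else if ["politeness", "empathy", "humor", "emotional_tone"].contains t then 1
  else if ["verbosity", "clarity", "specificity", "concreteness"].contains t then 2
  else if ["assertiveness", "certainty", "authority", "persuasiveness"].contains t then 3
  else if ["creativity", "humor", "optimism", "enthusiasm"].contains t then 4
  else 5

-- the canonical accumulator value carried by a rank
def pvCanon : Nat → Option (Int × String)
  | 0 => some (0, "Formal-Academic")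
  | 1 => some (1, "Interpersonal")
  | 2 => some (2, "Linguistic-Surface")
  | 3 => some (3, "Assertive-Confident")
  | 4 => some (4, "Creative-Positive")
  | _ => none

-- index of the first category A's chain fires on (5 = fallback)
def pvChainIdx (ts : List String) : Nat :=
  if ts.any (fun t => ["formality", "technical_complexity", "authority", "register"].contains t) then 0
  else if ts.any (fun t => ["politeness", "empathy", "humor", "emotional_tone"].contains t) then 1
  else if ts.any (fun t => ["verbosity", "clarity", "specificity", "concreteness"].contains t) then 2
  else if ts.any (fun t => ["assertiveness", "certainty", "authority", "persuasiveness"].contains t) then 3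
  else if ts.any (fun t => ["creativity", "humor", "optimism", "enthusiasm"].contains t) then 4
  else 5

theorem pvCanon_ge (j : Nat) (h : 5 ≤ j) : pvCanon j = none := by
  match j, h with
  | (n+5), _ => rfl

theorem pvChainIdx_le (ts : List String) : pvChainIdx ts ≤ 5 := by
  unfold pvChainIdx; split_ifs <;> omega

-- the built index, as a literal
theorem pvTraitInfo_eq : pvTraitInfo = PySem.Dict.mk
    [("formality", (0, "Formal-Academic")), ("technical_complexity", (0, "Formal-Academic")),
     ("authority", (0, "Formal-Academic")), ("register", (0, "Formal-Academic")),
     ("politeness", (1, "Interpersonal")), ("empathy", (1, "Interpersonal")),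
     ("humor", (1, "Interpersonal")), ("emotional_tone", (1, "Interpersonal")),
     ("verbosity", (2, "Linguistic-Surface")), ("clarity", (2, "Linguistic-Surface")),
     ("specificity", (2, "Linguistic-Surface")), ("concreteness", (2, "Linguistic-Surface")),
     ("assertiveness", (3, "Assertive-Confident")), ("certainty", (3, "Assertive-Confident")),
     ("persuasiveness", (3, "Assertive-Confident")),
     ("creativity", (4, "Creative-Positive")), ("optimism", (4, "Creative-Positive")),
     ("enthusiasm", (4, "Creative-Positive"))] := by decide

-- dict lookup agrees with the rank chain
theorem pvGet (t : String) : pvTraitInfo.get? t = pvCanon (pvR t) := by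
  by_cases h0 : t = "formality"
  · subst h0; decide
  by_cases h1 : t = "technical_complexity"
  · subst h1; decide
  by_cases h2 : t = "authority"
  · subst h2; decide
  by_cases h3 : t = "register"
  · subst h3; decide
  by_cases h4 : t = "politeness"
  · subst h4; decide
  by_cases h5 : t = "empathy"
  · subst h5; decide
  by_cases h6 : t = "humor"
  · subst h6; decide
  by_cases h7 : t = "emotional_tone"
  · subst h7; decide
  by_cases h8 : t = "verbosity"
  · subst h8; decide
  by_cases h9 : t = "clarity"
  · subst h9; decide
  by_cases h10 : t = "specificity"
  · subst h10; decide
  by_cases h11 : t = "concreteness"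
  · subst h11; decide
  by_cases h12 : t = "assertiveness"
  · subst h12; decide
  by_cases h13 : t = "certainty"
  · subst h13; decide
  by_cases h14 : t = "persuasiveness"
  · subst h14; decide
  by_cases h15 : t = "creativity"
  · subst h15; decide
  by_cases h16 : t = "optimism"
  · subst h16; decide
  by_cases h17 : t = "enthusiasm"
  · subst h17; decide
  have hr : pvR t = 5 := by
    simp [pvR, h0, h1, h2, h3, h4, h5, h6, h7, h8, h9, h10, h11, h12, h13, h14, h15, h16, h17]
  rw [hr, pvTraitInfo_eq]
  simp [PySem.Dict.get?, Ne.symm h0, Ne.symm h1, Ne.symm h2, Ne.symm h3, Ne.symm h4, Ne.symm h5, Ne.symm h6, Ne.symm h7, Ne.symm h8, Ne.symm h9, Ne.symm h10, Ne.symm h11, Ne.symm h12, Ne.symm h13, Ne.symm h14, Ne.symm h15, Ne.symm h16, Ne.symm h17, pvCanon]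

-- merging two canonical values takes the minimum rank
theorem pvMerge (j k : Nat) :
    (match pvCanon k, pvCanon j with
     | some info, none => some info
     | some info, some b => if info.1 < b.1 then some info else some b
     | none, _ => pvCanon j) = pvCanon (min j k) := by
  rcases Nat.lt_or_ge j 5 with hj | hj <;> rcases Nat.lt_or_ge k 5 with hk | hk
  · interval_cases j <;> interval_cases k <;> decide
  · rw [pvCanon_ge k hk, Nat.min_eq_left (le_of_lt (lt_of_lt_of_le hj hk))]
  · rw [pvCanon_ge j hj, Nat.min_eq_right (le_of_lt (lt_of_lt_of_le hk hj))]
    interval_cases k <;> rfl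
  · rw [pvCanon_ge j hj, pvCanon_ge k hk, pvCanon_ge (min j k) (le_min hj hk)]

theorem pvStep_canon (j : Nat) (t : String) : pvStep (pvCanon j) t = pvCanon (min j (pvR t)) := by
  unfold pvStep; rw [pvGet]; exact pvMerge j (pvR t)

-- B's inner fold from a canonical accumulator stays canonical, at the running minimum rank
theorem pvFold (ts : List String) : ∀ j : Nat,
    ts.foldl pvStep (pvCanon j) = pvCanon (ts.foldl (fun m t => min m (pvR t)) j) := by
  induction ts with
  | nil => intro j; rfl
  | cons t ts ih => intro j; simp only [List.foldl_cons]; rw [pvStep_canon]; exact ih _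

-- A's first-firing index takes in one more trait by a min
set_option maxHeartbeats 2000000 in
theorem pvChain_cons (t : String) (ts : List String) :
    pvChainIdx (t :: ts) = min (pvR t) (pvChainIdx ts) := by
  simp only [pvChainIdx, pvR, List.any_cons]
  split_ifs <;> first
    | omega
    | (simp only [Bool.or_eq_true] at * ; tauto)

-- the min-rank fold computes A's first-firing index
theorem pvChain_foldl (ts : List String) : ∀ j : Nat, j ≤ 5 →
    ts.foldl (fun m t => min m (pvR t)) j = min j (pvChainIdx ts) := by
  induction ts with
  | nil =>
      intro j hj
      simp only [List.foldl_nil, pvChainIdx, List.any_nil, if_neg Bool.false_ne_true]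
      omega
  | cons t ts ih =>
      intro j hj
      simp only [List.foldl_cons]
      rw [ih (min j (pvR t)) (le_trans (Nat.min_le_left _ _) hj), pvChain_cons, Nat.min_assoc]

-- per-factor: A's chain name = B's arg-min name
theorem pvName_eq (ts : List String) (n : Int) :
    (if ts.any (fun t => ["formality", "technical_complexity", "authority", "register"].contains t) then "Formal-Academic"
     else if ts.any (fun t => ["politeness", "empathy", "humor", "emotional_tone"].contains t) then "Interpersonal"
     else if ts.any (fun t => ["verbosity", "clarity", "specificity", "concreteness"].contains t) then "Linguistic-Surface"
     else if ts.any (fun t => ["assertiveness", "certainty", "authority", "persuasiveness"].contains t) then "Assertive-Confident"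
     else if ts.any (fun t => ["creativity", "humor", "optimism", "enthusiasm"].contains t) then "Creative-Positive"
     else "Factor_" ++ PySem.Int.toStr (n + 1)) =
    (match ts.foldl pvStep none with
     | some b => b.2
     | none => "Factor_" ++ PySem.Int.toStr (n + 1)) := by
  have h : ts.foldl pvStep none = pvCanon (pvChainIdx ts) := by
    have h5 : (none : Option (Int × String)) = pvCanon 5 := rfl
    rw [h5, pvFold ts 5, pvChain_foldl ts 5 (le_refl 5),
      Nat.min_eq_right (pvChainIdx_le ts)]
  rw [h]
  unfold pvChainIdx
  split_ifs <;> rfl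

-- the outer loops agree step by step
theorem pvOuter (l : List (String × List String)) : ∀ acc : List String,
    l.foldl (fun factor_names p =>
      let top_traits := p.2
      let name :=
        if top_traits.any (fun trait => ["formality", "technical_complexity", "authority", "register"].contains trait) then "Formal-Academic"
        else if top_traits.any (fun trait => ["politeness", "empathy", "humor", "emotional_tone"].contains trait) then "Interpersonal"
        else if top_traits.any (fun trait => ["verbosity", "clarity", "specificity", "concreteness"].contains trait) then "Linguistic-Surface"
        else if top_traits.any (fun trait => ["assertiveness", "certainty", "authority", "persuasiveness"].contains trait) then "Assertive-Confident"
        else if top_traits.any (fun trait => ["creativity", "humor", "optimism", "enthusiasm"].contains trait) then "Creative-Positive"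
        else "Factor_" ++ PySem.Int.toStr ((factor_names.length : Int) + 1)
      factor_names ++ [name]) acc =
    l.foldl (fun factor_names p =>
      let best := p.2.foldl pvStep none
      factor_names ++ [match best with
        | some b => b.2
        | none => "Factor_" ++ PySem.Int.toStr ((factor_names.length : Int) + 1)]) acc := by
  induction l with
  | nil => intro acc; rfl
  | cons hd tl ih =>
      intro acc
      simp only [List.foldl_cons]
      rw [pvName_eq hd.2 ((acc.length : Int))]
      exact ih _

-- ===== VERDICT (by name: the statement is the Claim_ definition above) =====
theorem generate_factor_names_py_spec : Claim_equal_generate_factor_names_py := by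
  intro fi _
  show generate_factor_names_py fi = generate_factor_names_py_alt fi
  exact pvOuter fi []
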